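-- pv_equiv track=rewrite | github.com/JakubDotPy/aoc2017 | day06/part1.py | parts_gen
-- ===== SOURCE A (Python) =====
-- import math
-- from itertools import islice
--
-- def parts_gen(how_many, n_parts):
--     iterable = range(how_many)
--     n = math.ceil(how_many / n_parts)
--     if n < 1:
--         raise ValueError('n must be at least one')
--     it = iter(iterable)
--     while (batch := list(islice(it, n))):
--         yield len(batch)
-- ===== SOURCE B (Python) =====
-- import math
--
-- def parts_gen(how_many, n_parts):
--     # Closed-form batch sizes: full batches of size n, plus one remainder batch.
--     n = math.ceil(how_many / n_parts)
--     if n < 1: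
--         raise ValueError('n must be at least one')
--     if how_many > 0:
--         full, rem = divmod(how_many, n)
--         yield from [n] * full
--         if rem:
--             yield rem
-- ===== Notes on version B (the rewrite author's own statement) =====
-- stated objective: faster
-- what changed: A materializes every batch via islice over range(how_many) and yields its length; B computes the batch sizes arithmetically with one divmod and yields full//rem counts without touching the range at all.
import Mathlib
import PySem

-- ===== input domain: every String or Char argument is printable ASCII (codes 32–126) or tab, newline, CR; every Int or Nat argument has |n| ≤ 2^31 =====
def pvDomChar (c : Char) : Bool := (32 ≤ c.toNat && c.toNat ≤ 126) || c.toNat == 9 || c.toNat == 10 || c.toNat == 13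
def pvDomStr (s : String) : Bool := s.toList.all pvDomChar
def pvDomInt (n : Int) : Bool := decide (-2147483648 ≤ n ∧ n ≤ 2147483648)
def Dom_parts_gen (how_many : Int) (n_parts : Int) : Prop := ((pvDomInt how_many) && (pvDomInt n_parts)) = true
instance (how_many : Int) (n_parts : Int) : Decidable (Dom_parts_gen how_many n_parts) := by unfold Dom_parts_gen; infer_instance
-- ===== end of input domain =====

-- B replaces A's O(how_many) batch-materialising loop by a divmod closed form over batch
-- counts (O(how_many / n) output, no batches built); return-value equivalence only (A is a generator).
-- On Dom (|ints| ≤ 2^31) Python's math.ceil(a/b) equals exact ceiling division, ported as -((-a) // b).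

-- ===== PORT A =====
-- while (batch := list(islice(it, n))): yield len(batch)
def partsALoop (n : Nat) (xs : List Int) : List Int :=
  if (xs.take n).isEmpty then []
  else ((xs.take n).length : Int) :: partsALoop n (xs.drop n)
  termination_by xs.length
  decreasing_by
    rename_i h
    simp only [List.isEmpty_iff, List.take_eq_nil_iff, not_or] at h
    have h1 : 0 < xs.length := List.length_pos_iff.mpr h.2
    simp only [List.length_drop]
    omega

def parts_gen (how_many : Int) (n_parts : Int) : List Int :=
  let n : Int := -(PySem.Int.floordiv (-how_many) n_parts)  -- math.ceil(how_many / n_parts); exact on Dom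
  if n < 1 then []  -- Python raises ValueError here (and ZeroDivisionError when n_parts = 0): outside Pre_
  else partsALoop n.toNat (PySem.List.pyRange 0 how_many 1)

-- ===== PORT B =====
def parts_gen_alt (how_many : Int) (n_parts : Int) : List Int :=
  let n : Int := -(PySem.Int.floordiv (-how_many) n_parts)  -- math.ceil(how_many / n_parts); exact on Dom
  if n < 1 then []  -- Python raises ValueError here: outside Pre_
  else if how_many > 0 then
    let full := PySem.Int.floordiv how_many n
    let rem := PySem.Int.mod how_many n
    List.replicate full.toNat n ++ (if rem ≠ 0 then [rem] else [])
  else []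

-- ===== PRECONDITION & SPEC =====
-- Pre_ excludes exactly the inputs on which A raises: n_parts = 0 (ZeroDivisionError) and
-- ceil(how_many / n_parts) < 1 (explicit ValueError).
def Pre_parts_gen (how_many : Int) (n_parts : Int) : Prop :=
  n_parts ≠ 0 ∧ 1 ≤ -(PySem.Int.floordiv (-how_many) n_parts)
instance (how_many : Int) (n_parts : Int) : Decidable (Pre_parts_gen how_many n_parts) := by
  unfold Pre_parts_gen; infer_instance
def pvWitness_parts_gen : Int × Int := (7, 3)

def Spec_parts_gen (how_many : Int) (n_parts : Int) (out : List Int) : Prop := out = parts_gen_alt how_many n_parts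
instance (how_many : Int) (n_parts : Int) (out : List Int) : Decidable (Spec_parts_gen how_many n_parts out) := by unfold Spec_parts_gen; infer_instance

-- ===== CLAIM (what is proved, stated in full; the proofs are below) =====
def Claim_equal_parts_gen : Prop := ∀ (how_many : Int) (n_parts : Int), Dom_parts_gen how_many n_parts → Pre_parts_gen how_many n_parts → Spec_parts_gen how_many n_parts (parts_gen how_many n_parts)

-- ===== LEMMAS AND PROOFS =====

-- A's loop depends only on the length of the list it consumes, and equals B's closed form.
theorem partsALoop_closed (n : Nat) (hn : 0 < n) (xs : List Int) :
    partsALoop n xs =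
      List.replicate (xs.length / n) (n : Int) ++
        (if xs.length % n ≠ 0 then [((xs.length % n : Nat) : Int)] else []) := by
  generalize hL : xs.length = L
  induction L using Nat.strong_induction_on generalizing xs with
  | _ L ih =>
    rw [partsALoop]
    by_cases hx : xs = []
    · subst hx; simp at hL; subst hL; simp [Nat.zero_div]
    · have hxe : (xs.take n).isEmpty = false := by
        simp only [List.isEmpty_eq_false_iff, ne_eq, List.take_eq_nil_iff, not_or]
        exact ⟨by omega, hx⟩
      simp only [hxe, if_neg Bool.false_ne_true]
      by_cases hle : L ≤ n
      · -- single (possibly partial) batch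
        have htake : (xs.take n).length = L := by simp [hL]; omega
        have hdrop : (xs.drop n).length = 0 := by simp [hL]; omega
        rw [partsALoop]
        have : ((xs.drop n).take n).isEmpty = true := by
          simp only [List.isEmpty_iff, List.take_eq_nil_iff]
          exact Or.inr (List.eq_nil_of_length_eq_zero hdrop)
        simp only [this, htake]
        have hLpos : 0 < L := by
          rcases xs with _ | _; · exact absurd rfl hx
          · simp at hL; omega
        by_cases heq : L = n
        · subst heq
          have h1 : L / L = 1 := Nat.div_self hLpos
          have h2 : L % L = 0 := Nat.mod_self L
          simp [h1, h2]
        · have h1 : L / n = 0 := Nat.div_eq_of_lt (by omega)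
          have h2 : L % n = L := Nat.mod_eq_of_lt (by omega)
          simp [h1, h2, Ne.symm, hLpos.ne']
      · -- full batch of size n, recurse on the rest
        have htake : (xs.take n).length = n := by simp [hL]; omega
        have hdrop : (xs.drop n).length = L - n := by simp [hL]
        rw [ih (L - n) (by omega) _ hdrop, htake]
        have hdiv : L / n = (L - n) / n + 1 := by
          rw [Nat.div_eq_sub_div hn (by omega)]
        have hmod : L % n = (L - n) % n := by
          conv_lhs => rw [show L = (L - n) + n from by omega]
          simp [Nat.add_mod_right]
        rw [hdiv, hmod, List.replicate_succ]
        simp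

theorem parts_gen_spec : Claim_equal_parts_gen := by
  intro hm np _ hpre
  unfold Spec_parts_gen parts_gen parts_gen_alt
  obtain ⟨hnp, hn1⟩ := hpre
  set n : Int := -(PySem.Int.floordiv (-hm) np) with hndef
  have hnlt : ¬ n < 1 := by omega
  simp only [if_neg hnlt]
  by_cases hhm : hm > 0
  · simp only [if_pos hhm]
    have hnpos : (0:Int) < n := by omega
    have hrange : (PySem.List.pyRange 0 hm 1).length = hm.toNat := by
      rw [PySem.List.length_pyRange_one]; simp
    rw [partsALoop_closed n.toNat (by omega) _, hrange]
    have hfd : PySem.Int.floordiv hm n = hm / n := PySem.Int.floordiv_eq_ediv_of_pos hnpos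
    have hmd : PySem.Int.mod hm n = hm % n := PySem.Int.mod_eq_emod_of_pos hnpos
    rw [hfd, hmd]
    have hmn : hm = ((hm.toNat : Nat) : Int) := (Int.toNat_of_nonneg hhm.le).symm
    have hnn : n = ((n.toNat : Nat) : Int) := (Int.toNat_of_nonneg hnpos.le).symm
    have e2 : hm % n = ((hm.toNat % n.toNat : Nat) : Int) := by
      conv_lhs => rw [hmn, hnn]
      exact (Int.natCast_emod _ _).symm
    have e1 : (hm / n).toNat = hm.toNat / n.toNat := by
      conv_lhs => rw [hmn, hnn, ← Int.natCast_ediv]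
      exact Int.toNat_natCast _
    rw [e1, e2, ← hnn]
    simp only [ne_eq, Int.natCast_eq_zero]
  · simp only [if_neg hhm]
    have : PySem.List.pyRange 0 hm 1 = [] := PySem.List.pyRange_one_eq_nil (by omega)
    rw [this, partsALoop]
    simp
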